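-- pv_equiv track=rewrite | github.com/loco-co/Algorithm | Programmers/코딩테스트 고득점 Kit/완전탐색/모의고사.py | solution
-- ===== SOURCE A (Python) =====
-- def solution(answers):
--     modea = [1,2,3,4,5]
--     modeb = [2,1,2,3,2,4,2,5]
--     modec = [3,3,1,1,2,2,4,4,5,5]
--     score = [0,0,0]
--
--     for i in range(len(answers)):
--         if answers[i] == modea[i%5]:
--             score[0] += 1
--     for i in range(len(answers)):
--         if answers[i] == modeb[i%8]:
--             score[1] += 1
--     for i in range(len(answers)):
--         if answers[i] == modec[i%10]:
--             score[2] += 1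
--
--     m = max(score)
--     answer = []
--     if score[0] == m: answer.append(1)
--     if score[1] == m: answer.append(2)
--     if score[2] == m: answer.append(3)
--     return answer
-- ===== SOURCE B (Python) =====
-- def solution(answers):
--     modea = [1,2,3,4,5]
--     modeb = [2,1,2,3,2,4,2,5]
--     modec = [3,3,1,1,2,2,4,4,5,5]
--     # One pass builds a histogram keyed by (position mod 40, answer); 40 = lcm(5,8,10),
--     # so each score is then 40 table lookups, with no rescan of the answers.
--     cnt = {}
--     for i, a in enumerate(answers):
--         cnt[(i % 40, a)] = cnt.get((i % 40, a), 0) + 1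
--     scores = [sum(cnt.get((r, pat[r % len(pat)]), 0) for r in range(40))
--               for pat in (modea, modeb, modec)]
--     m = max(scores)
--     return [k + 1 for k, s in enumerate(scores) if s == m]
-- ===== Notes on version B (the rewrite author's own statement) =====
-- stated objective: alternative
-- what changed: Instead of three scans comparing each answer against a cyclic pattern by modular indexing, B builds in one pass a histogram keyed by (position mod 40, answer) (40 = lcm of the pattern lengths) and derives each score as a sum of 40 table lookups, never rescanning the answers; the result is built by a comprehension over the enumerated score list.
import Mathlib
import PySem

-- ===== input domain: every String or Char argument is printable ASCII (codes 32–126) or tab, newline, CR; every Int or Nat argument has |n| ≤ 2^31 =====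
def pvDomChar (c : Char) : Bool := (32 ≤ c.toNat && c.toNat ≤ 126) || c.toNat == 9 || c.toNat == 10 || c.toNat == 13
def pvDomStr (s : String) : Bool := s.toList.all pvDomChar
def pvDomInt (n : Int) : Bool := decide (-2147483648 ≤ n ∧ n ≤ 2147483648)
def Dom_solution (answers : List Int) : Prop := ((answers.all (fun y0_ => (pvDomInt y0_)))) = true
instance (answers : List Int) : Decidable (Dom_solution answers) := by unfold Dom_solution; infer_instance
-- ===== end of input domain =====

-- B replaces A's three pattern-matching scans by one histogram pass keyed by (index mod 40, answer),
-- 40 = lcm of the pattern lengths; each score is then a sum of 40 table lookups (alternative algorithm, same cost).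

-- ===== PORT A =====
def solution (answers : List Int) : List Int :=
  let modea : List Int := [1,2,3,4,5]
  let modeb : List Int := [2,1,2,3,2,4,2,5]
  let modec : List Int := [3,3,1,1,2,2,4,4,5,5]
  let n : Int := (answers.length : Int)
  let s0 : Int := (PySem.List.pyRange 0 n 1).foldl
    (fun s i => if PySem.List.pyGetD answers i 0 = PySem.List.pyGetD modea (PySem.Int.mod i 5) 0 then s + 1 else s) 0
  let s1 : Int := (PySem.List.pyRange 0 n 1).foldl
    (fun s i => if PySem.List.pyGetD answers i 0 = PySem.List.pyGetD modeb (PySem.Int.mod i 8) 0 then s + 1 else s) 0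
  let s2 : Int := (PySem.List.pyRange 0 n 1).foldl
    (fun s i => if PySem.List.pyGetD answers i 0 = PySem.List.pyGetD modec (PySem.Int.mod i 10) 0 then s + 1 else s) 0
  let m : Int := (PySem.List.max? [s0, s1, s2] (fun y => y)).getD 0   -- list is nonempty, max? is always some
  (if s0 = m then [(1:Int)] else []) ++ (if s1 = m then [(2:Int)] else []) ++ (if s2 = m then [(3:Int)] else [])

-- ===== PORT B =====
def solution_alt (answers : List Int) : List Int :=
  let modea : List Int := [1,2,3,4,5]
  let modeb : List Int := [2,1,2,3,2,4,2,5]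
  let modec : List Int := [3,3,1,1,2,2,4,4,5,5]
  let cnt : PySem.Dict (Int × Int) Int :=
    (PySem.List.enumerate answers 0).foldl
      (fun d q => d.insert (PySem.Int.mod q.1 40, q.2) (d.getD (PySem.Int.mod q.1 40, q.2) 0 + 1))
      PySem.Dict.empty
  let scores : List Int := [modea, modeb, modec].map (fun pat =>
    ((PySem.List.pyRange 0 40 1).map
      (fun r => cnt.getD (r, PySem.List.pyGetD pat (PySem.Int.mod r (pat.length : Int)) 0) 0)).sum)
  let m : Int := (PySem.List.max? scores (fun y => y)).getD 0   -- scores is nonempty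
  ((PySem.List.enumerate scores 0).filter (fun p => p.2 == m)).map (fun p => p.1 + 1)

-- ===== PRECONDITION & SPEC =====
def Spec_solution (answers : List Int) (out : List Int) : Prop := out = solution_alt answers
instance (answers : List Int) (out : List Int) : Decidable (Spec_solution answers out) := by unfold Spec_solution; infer_instance

-- ===== CLAIM (what is proved, stated in full; the proofs are below) =====
def Claim_equal_solution : Prop := ∀ (answers : List Int), Dom_solution answers → Spec_solution answers (solution answers)

-- ===== LEMMAS AND PROOFS =====

-- one pyRange-40 term of B's lookup sum, on a single pair: the indicator of a histogram hit
theorem ind40 (m x : Int) (v : Int → Int) (hm0 : 0 ≤ m) (hm : m < 40) :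
    ((PySem.List.pyRange 0 40 1).map
      (fun r => if ((m, x) = (r, v r)) then (1:Int) else 0)).sum
    = if x = v m then 1 else 0 := by
  have hr : PySem.List.pyRange 0 40 1 = (List.range 40).map (fun k : Nat => ((k : Int))) := by
    have h40 : Int.toNat 40 = 40 := rfl
    rw [PySem.List.pyRange_one]; norm_num [h40]
  rw [hr, List.map_map]
  have hb : ((List.range 40).map ((fun r => if ((m, x) = (r, v r)) then (1:Int) else 0) ∘ fun k : Nat => ((k : Int)))).sum
      = ∑ k ∈ Finset.range 40, if ((m, x) = ((k : Int), v k)) then (1:Int) else 0 := rfl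
  rw [hb]
  have hcong : ∀ k ∈ Finset.range 40,
      (if ((m, x) = ((k : Int), v k)) then (1:Int) else 0)
      = if k = m.toNat then (if x = v m then (1:Int) else 0) else 0 := by
    intro k _
    by_cases hk : (k : Int) = m
    · have hk2 : k = m.toNat := by omega
      subst hk2
      simp [Prod.ext_iff, hk]
    · have hk2 : k ≠ m.toNat := by omega
      simp only [Prod.ext_iff, hk2, if_false]
      rw [if_neg]
      rintro ⟨h1, _⟩
      exact hk h1.symm
  rw [Finset.sum_congr rfl hcong, Finset.sum_ite_eq' (Finset.range 40) m.toNat]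
  simp [show m.toNat ∈ Finset.range 40 by simp; omega]

-- B's 40 lookups into the (index mod 40, answer) histogram count exactly A's per-element matches
theorem score_eq (l : List (Int × Int)) (v : Int → Int)
    (hv : ∀ i, v (PySem.Int.mod i 40) = v i) :
    ((PySem.List.pyRange 0 40 1).map
      (fun r => ((l.map (fun q => (PySem.Int.mod q.1 40, q.2))).count (r, v r) : Int))).sum
    = (l.countP (fun q => q.2 == v q.1) : Int) := by
  induction l with
  | nil => simp
  | cons q l ih =>
    simp only [List.map_cons, List.count_cons, List.countP_cons, beq_iff_eq]
    push_cast
    rw [List.sum_map_add, ih,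
      ind40 _ _ v (PySem.Int.mod_nonneg q.1 (by norm_num)) (PySem.Int.mod_lt q.1 (by norm_num)), hv]

-- A's index loop for one pattern is the countP over enumerate of the match predicate
theorem a_score_eq (answers : List Int) (pat : List Int) (L : Int) :
    (PySem.List.pyRange 0 (answers.length : Int) 1).foldl
      (fun s i => if PySem.List.pyGetD answers i 0 = PySem.List.pyGetD pat (PySem.Int.mod i L) 0 then s + 1 else s) (0:Int)
    = ((PySem.List.enumerate answers 0).countP
        (fun q => q.2 == PySem.List.pyGetD pat (PySem.Int.mod q.1 L) 0) : Int) := by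
  rw [PySem.List.foldl_ite_add_one, PySem.List.enumerate_eq_map_pyRange (d := 0), List.countP_map]
  simp only [PySem.List.len_eq]
  norm_num
  apply List.countP_congr
  intro j _
  simp [Function.comp]

-- B's histogram score for one pattern equals A's scan score for that pattern
theorem score_bridge (answers pat : List Int) (L : Int) (hlen : ((pat.length : Int)) = L)
    (hL : 0 < L) (hdvd : L ∣ 40) :
    ((PySem.List.pyRange 0 40 1).map
      (fun r => ((PySem.List.enumerate answers 0).foldl
          (fun d q => d.insert (PySem.Int.mod q.1 40, q.2) (d.getD (PySem.Int.mod q.1 40, q.2) 0 + 1))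
          PySem.Dict.empty).getD
        (r, PySem.List.pyGetD pat (PySem.Int.mod r ((pat.length : Int))) 0) 0)).sum
    = (PySem.List.pyRange 0 (answers.length : Int) 1).foldl
        (fun s i => if PySem.List.pyGetD answers i 0 = PySem.List.pyGetD pat (PySem.Int.mod i L) 0 then s + 1 else s) (0:Int) := by
  have hd : (PySem.List.enumerate answers 0).foldl
      (fun d q => d.insert (PySem.Int.mod q.1 40, q.2) (d.getD (PySem.Int.mod q.1 40, q.2) 0 + 1))
      (PySem.Dict.empty : PySem.Dict (Int × Int) Int)
      = ((PySem.List.enumerate answers 0).map (fun q => (PySem.Int.mod q.1 40, q.2))).foldl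
          (fun d x => d.insert x (d.getD x 0 + 1)) PySem.Dict.empty := by rw [List.foldl_map]
  have hget : ∀ r : Int,
      ((PySem.List.enumerate answers 0).foldl
          (fun d q => d.insert (PySem.Int.mod q.1 40, q.2) (d.getD (PySem.Int.mod q.1 40, q.2) 0 + 1))
          (PySem.Dict.empty : PySem.Dict (Int × Int) Int)).getD
        (r, PySem.List.pyGetD pat (PySem.Int.mod r L) 0) 0
      = (((PySem.List.enumerate answers 0).map (fun q => (PySem.Int.mod q.1 40, q.2))).count
          (r, PySem.List.pyGetD pat (PySem.Int.mod r L) 0) : Int) := by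
    intro r
    rw [hd, PySem.Dict.getD_foldl_insert_add_one]
    norm_num [PySem.Dict.getD, PySem.Dict.get?, PySem.Dict.empty]
  rw [hlen, a_score_eq, List.map_congr_left (fun r _ => hget r)]
  exact score_eq (PySem.List.enumerate answers 0) (fun i => PySem.List.pyGetD pat (PySem.Int.mod i L) 0)
    (fun i => by
      show PySem.List.pyGetD pat (PySem.Int.mod (PySem.Int.mod i 40) L) 0
        = PySem.List.pyGetD pat (PySem.Int.mod i L) 0
      rw [PySem.Int.mod_eq_emod_of_pos (show (0:Int) < 40 by norm_num),
        PySem.Int.mod_eq_emod_of_pos hL, PySem.Int.mod_eq_emod_of_pos hL,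
        Int.emod_emod_of_dvd i hdvd])

-- B's filter/map over the enumerated score list is A's if/append chain
theorem out_eq (a b c m : Int) :
    ((PySem.List.enumerate [a, b, c] 0).filter (fun p => p.2 == m)).map (fun p => p.1 + 1)
    = (if a = m then [(1:Int)] else []) ++ (if b = m then [(2:Int)] else []) ++ (if c = m then [(3:Int)] else []) := by
  simp [PySem.List.enumerate_cons, PySem.List.enumerate_nil, List.filter_cons]
  split_ifs <;> simp_all

-- ===== VERDICT (by name: the statement is the Claim_ definition above) =====
theorem solution_spec : Claim_equal_solution := by
  intro answers _
  unfold Spec_solution solution solution_alt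
  simp only [List.map_cons, List.map_nil]
  rw [score_bridge answers [1,2,3,4,5] 5 (by norm_num) (by norm_num) (by norm_num),
      score_bridge answers [2,1,2,3,2,4,2,5] 8 (by norm_num) (by norm_num) (by norm_num),
      score_bridge answers [3,3,1,1,2,2,4,4,5,5] 10 (by norm_num) (by norm_num) (by norm_num),
      out_eq]
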